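-- pv_equiv track=rewrite | github.com/nortikin/sverchok | utils/boolean_2d_core.py | create_new_indexes
-- ===== SOURCE A (Python) =====
-- def create_new_indexes(verts_out, mask):
--     '''compare vector with mask and create new index table'''
--     new_index = []
--     off = 0
--     for i in range(len(verts_out)):
--         if mask[i]:
--             new_index.append(i - off)
--         else:
--             off += 1
--             new_index.append(-1)
--     return new_index
-- ===== SOURCE B (Python) =====
-- def create_new_indexes(verts_out, mask):
--     '''compare vector with mask and create new index table'''
--     n = len(verts_out)
--     # exclusive prefix counts of truthy mask entries: prefix[i] = #truthy before i
--     prefix = [0]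
--     for i in range(n):
--         prefix.append(prefix[-1] + (1 if mask[i] else 0))
--     return [prefix[i] if mask[i] else -1 for i in range(n)]
-- ===== Notes on version B (the rewrite author's own statement) =====
-- stated objective: alternative
-- what changed: Replaced the single stateful offset-accumulator loop by two passes: first build an exclusive prefix-count table of the mask, then map each index to its prefix count (or -1), exploiting that i - off equals the number of truthy mask entries before i.
import Mathlib
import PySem

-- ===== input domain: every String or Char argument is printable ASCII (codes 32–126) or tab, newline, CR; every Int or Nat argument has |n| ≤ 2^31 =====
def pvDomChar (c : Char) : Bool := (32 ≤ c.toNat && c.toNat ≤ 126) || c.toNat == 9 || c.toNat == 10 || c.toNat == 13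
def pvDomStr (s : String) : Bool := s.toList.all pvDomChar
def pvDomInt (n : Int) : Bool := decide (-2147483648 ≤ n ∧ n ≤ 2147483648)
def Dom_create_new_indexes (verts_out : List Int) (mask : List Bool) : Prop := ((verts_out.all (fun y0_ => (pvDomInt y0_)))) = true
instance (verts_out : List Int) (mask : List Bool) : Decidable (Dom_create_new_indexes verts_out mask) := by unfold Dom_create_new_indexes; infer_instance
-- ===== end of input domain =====

-- B replaces A's stateful offset-accumulator loop by two passes: build an exclusive
-- prefix-count table of the mask, then map each index through it (alternative decomposition).


-- ===== PORT A =====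
-- mask[i] is ported as getD (Python raises IndexError when i ≥ len(mask); Pre_ excludes that)
def create_new_indexes (verts_out : List Int) (mask : List Bool) : List Int :=
  ((List.range verts_out.length).foldl
    (fun (st : List Int × Int) i =>
      if mask.getD i false then (st.1 ++ [(i : Int) - st.2], st.2)
      else (st.1 ++ [(-1 : Int)], st.2 + 1))
    ([], 0)).1

-- ===== PORT B =====
def create_new_indexes_alt (verts_out : List Int) (mask : List Bool) : List Int :=
  let n := verts_out.length
  let pre := (List.range n).foldl
    (fun (p : List Int) i => p ++ [p.getLast! + (if mask.getD i false then 1 else 0)]) [0]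
  (List.range n).map (fun i => if mask.getD i false then pre.getD i 0 else -1)

-- ===== PRECONDITION & SPEC =====
-- Pre_ excludes exactly the inputs where Python A raises IndexError (mask shorter than verts_out)
def Pre_create_new_indexes (verts_out : List Int) (mask : List Bool) : Prop :=
  verts_out.length ≤ mask.length
instance (verts_out : List Int) (mask : List Bool) : Decidable (Pre_create_new_indexes verts_out mask) := by
  unfold Pre_create_new_indexes; infer_instance
def pvWitness_create_new_indexes : List Int × List Bool := ([3, 7, -2], [true, false, true])

def Spec_create_new_indexes (verts_out : List Int) (mask : List Bool) (out : List Int) : Prop := out = create_new_indexes_alt verts_out mask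
instance (verts_out : List Int) (mask : List Bool) (out : List Int) : Decidable (Spec_create_new_indexes verts_out mask out) := by unfold Spec_create_new_indexes; infer_instance

-- ===== CLAIM (what is proved, stated in full; the proofs are below) =====
def Claim_equal_create_new_indexes : Prop := ∀ (verts_out : List Int) (mask : List Bool), Dom_create_new_indexes verts_out mask → Pre_create_new_indexes verts_out mask → Spec_create_new_indexes verts_out mask (create_new_indexes verts_out mask)

-- ===== LEMMAS AND PROOFS =====

-- number of truthy mask entries among indices < k
def pvCnt (mask : List Bool) (k : Nat) : Int :=
  ((List.range k).countP (fun i => mask.getD i false) : Int)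

theorem pvCnt_succ (mask : List Bool) (k : Nat) :
    pvCnt mask (k + 1) = pvCnt mask k + (if mask.getD k false then 1 else 0) := by
  simp [pvCnt, List.range_succ, List.countP_append]

theorem aFold (mask : List Bool) (k : Nat) :
    (List.range k).foldl
      (fun (st : List Int × Int) i =>
        if mask.getD i false then (st.1 ++ [(i : Int) - st.2], st.2)
        else (st.1 ++ [(-1 : Int)], st.2 + 1))
      ([], 0)
    = ((List.range k).map
        (fun i => if mask.getD i false then pvCnt mask i else -1),
       (k : Int) - pvCnt mask k) := by
  induction k with
  | zero => simp [pvCnt]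
  | succ k ih =>
    rw [List.range_succ, List.foldl_append, ih]
    simp only [List.foldl_cons, List.foldl_nil, List.map_append, List.map_cons, List.map_nil,
      pvCnt_succ]
    split_ifs with h <;> refine Prod.ext (by simp) ?_ <;> simp <;> ring

theorem bFold (mask : List Bool) (k : Nat) :
    (List.range k).foldl
      (fun (p : List Int) i => p ++ [p.getLast! + (if mask.getD i false then 1 else 0)]) [0]
    = (List.range (k + 1)).map (pvCnt mask) := by
  induction k with
  | zero => simp [pvCnt]
  | succ k ih =>
    rw [List.range_succ, List.foldl_append, ih]
    rw [List.range_succ (n := k + 1), List.map_append]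
    simp only [List.foldl_cons, List.foldl_nil, List.map_cons, List.map_nil]
    have hne : (List.range (k + 1)).map (pvCnt mask) ≠ [] := by simp
    have : ((List.range (k + 1)).map (pvCnt mask)).getLast! = pvCnt mask k := by
      apply List.getLast!_of_getLast?
      simp [List.getLast?_eq_getElem?]
    rw [this, pvCnt_succ]

theorem getD_map_range (mask : List Bool) (n i : Nat) (hi : i < n + 1) :
    ((List.range (n + 1)).map (pvCnt mask)).getD i 0 = pvCnt mask i := by
  rw [List.getD_eq_getElem?_getD, List.getElem?_map, List.getElem?_range hi]
  rfl

-- ===== VERDICT (by name: the statement is the Claim_ definition above) =====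
theorem create_new_indexes_spec : Claim_equal_create_new_indexes := by
  intro verts_out mask _ _
  show create_new_indexes verts_out mask = create_new_indexes_alt verts_out mask
  unfold create_new_indexes create_new_indexes_alt
  simp only []
  rw [aFold, bFold]
  apply List.map_congr_left
  intro i hi
  rw [List.mem_range] at hi
  rw [getD_map_range mask verts_out.length i (Nat.lt_succ_of_lt hi)]
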